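-- pv_equiv track=rewrite | github.com/jeetumore/pythonCode | countVisibleTowers.py | seetowers
-- ===== SOURCE A (Python) =====
-- def seetowers(height):
--     n = len(height)
--     ans = n * [0]
--
--     def calc(height):
--         seetower = []
--         for i in range(n):
--             ans[i] += len(seetower)
--             while len(seetower) > 0 and height[seetower[-1]] <= height[i]:
--                 seetower.pop()
--             seetower.append(i)
--
--
--     calc(height)
--     height.reverse()
--     ans.reverse()
--     calc(height)
--     ans.reverse()
--
--     return ans
-- ===== SOURCE B (Python) =====
-- def seetowers(height):
--     n = len(height)
--     ans = n * [0]
--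
--     def calc(height):
--         P = []    # P[i]: nearest j < i with height[j] > height[i], else -1
--         cnt = []  # cnt[i]: number of towers visible looking left from just after i (chain length)
--         for i in range(n):
--             j = i - 1
--             while j >= 0 and height[j] <= height[i]:
--                 j = P[j]
--             P.append(j)
--             cnt.append(1 if j < 0 else cnt[j] + 1)
--             ans[i] += 0 if i == 0 else cnt[i - 1]
--
--     calc(height)
--     height.reverse()
--     ans.reverse()
--     calc(height)
--     ans.reverse()
--
--     return ans
-- ===== Notes on version B (the rewrite author's own statement) =====
-- stated objective: alternative
-- what changed: Replaced the monotonic-stack helper by a stack-free DP: previous-greater jump pointers (P) built by chasing earlier links, with memoized visible-chain counts (cnt), keeping A's scaffold of two passes with reversals.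
import Mathlib
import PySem

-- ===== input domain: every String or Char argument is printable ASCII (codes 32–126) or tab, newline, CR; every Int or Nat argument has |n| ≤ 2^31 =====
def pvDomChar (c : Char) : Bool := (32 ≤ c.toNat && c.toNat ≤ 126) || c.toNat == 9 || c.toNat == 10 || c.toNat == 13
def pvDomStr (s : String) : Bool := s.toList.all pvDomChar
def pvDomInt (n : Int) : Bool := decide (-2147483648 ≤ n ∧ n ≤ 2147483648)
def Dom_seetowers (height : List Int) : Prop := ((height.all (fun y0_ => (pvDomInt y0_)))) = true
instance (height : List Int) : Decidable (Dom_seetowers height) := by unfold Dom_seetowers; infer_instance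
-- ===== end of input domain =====

-- B replaces A's monotonic stack by previous-greater jump pointers with memoized chain counts
-- (an alternative algorithm of similar cost); both Pythons mutate `height` identically (one net
-- reverse); the equivalence proved is about the return value.

-- ===== PORT A =====
-- the `while` pop loop of A's calc, stack kept top-first
def popW (h : List Int) (x : Int) : List Nat → List Nat
  | [] => []
  | j :: rest => if h.getD j 0 ≤ x then popW h x rest else j :: rest

-- A's inner helper `calc`: one pass over range n updating ans and the stack
def calcA (h : List Int) (n : Nat) (ans : List Int) : List Int :=
  ((List.range n).foldl (fun st i =>
      (st.1.set i (st.1.getD i 0 + (st.2.length : Int)),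
       i :: popW h (h.getD i 0) st.2))
    (ans, ([] : List Nat))).1

def seetowers (height : List Int) : List Int :=
  let n := height.length
  let ans := List.replicate n (0 : Int)
  let ans1 := calcA height n ans
  let ans2 := calcA height.reverse n ans1.reverse
  ans2.reverse

-- ===== PORT B =====
-- B's `while j >= 0 and height[j] <= x: j = P[j]` loop; the fuel argument only makes the
-- recursion total (links always decrease, so fuel n never runs out on a reachable state)
def jumpB (h P : List Int) (x : Int) : Nat → Int → Int
  | 0, j => j
  | f + 1, j =>
      if 0 ≤ j ∧ h.getD j.toNat 0 ≤ x then jumpB h P x f (P.getD j.toNat 0) else j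

-- B's `calc`: build P (previous-greater links) and cnt (memoized chain lengths) left to right
def calcB (h : List Int) (n : Nat) (ans : List Int) : List Int :=
  ((List.range n).foldl (fun st i =>
      let j := jumpB h st.2.1 (h.getD i 0) n ((i : Int) - 1)
      (st.1.set i (st.1.getD i 0 + (if i == 0 then 0 else st.2.2.getD (i - 1) 0)),
       st.2.1 ++ [j],
       st.2.2 ++ [if j < 0 then (1 : Int) else st.2.2.getD j.toNat 0 + 1]))
    (ans, ([] : List Int), ([] : List Int))).1

def seetowers_alt (height : List Int) : List Int :=
  let n := height.length
  let ans := List.replicate n (0 : Int)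
  let ans1 := calcB height n ans
  let ans2 := calcB height.reverse n ans1.reverse
  ans2.reverse

-- ===== PRECONDITION & SPEC =====
def Spec_seetowers (height : List Int) (out : List Int) : Prop := out = seetowers_alt height
instance (height : List Int) (out : List Int) : Decidable (Spec_seetowers height out) := by unfold Spec_seetowers; infer_instance

-- ===== CLAIM (what is proved, stated in full; the proofs are below) =====
def Claim_equal_seetowers : Prop := ∀ (height : List Int), Dom_seetowers height → Spec_seetowers height (seetowers height)

-- ===== LEMMAS AND PROOFS =====

-- the indices visible scanning a list of indices with a running maximum; A's stack is exactly this
def visW (h : List Int) : List Nat → Option Int → List Nat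
  | [], _ => []
  | j :: rest, none => j :: visW h rest (some (h.getD j 0))
  | j :: rest, some r =>
      if r < h.getD j 0 then j :: visW h rest (some (h.getD j 0)) else visW h rest (some r)

-- nearest index k < j with h[k] > x (as Int, -1 if none): the specification of B's links
def pg (h : List Int) : Nat → Int → Int
  | 0, _ => -1
  | j + 1, x => if x < h.getD j 0 then (j : Int) else pg h j x

-- number of towers visible looking left from just after index j (inclusive chain length)
def vC (h : List Int) (j : Nat) : Int := ((visW h (List.range (j + 1)).reverse none).length : Int)

-- the common shape both calc passes reduce to
def specFold (h : List Int) (n : Nat) (ans : List Int) : List Int :=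
  (List.range n).foldl (fun ans i =>
    ans.set i (ans.getD i 0 + ((visW h (List.range i).reverse none).length : Int))) ans

theorem popW_visW (h : List Int) :
    ∀ (js : List Nat) (x : Int) (r : Option Int),
      (r = none ∨ ∃ y, r = some y ∧ y ≤ x) →
      popW h x (visW h js r) = visW h js (some x) := by
  intro js
  induction js with
  | nil => intro x r _; cases r <;> simp [visW, popW]
  | cons j rest ih =>
      intro x r hr
      have e2 : visW h (j :: rest) (some x)
          = if x < h.getD j 0 then j :: visW h rest (some (h.getD j 0))
            else visW h rest (some x) := rfl
      have e3 : ∀ t : List Nat, popW h x (j :: t)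
          = if h.getD j 0 ≤ x then popW h x t else j :: t := fun t => rfl
      rcases hr with rfl | ⟨y, rfl, hyx⟩
      · have e0 : visW h (j :: rest) none = j :: visW h rest (some (h.getD j 0)) := rfl
        rw [e0, e2, e3]
        by_cases hj : h.getD j 0 ≤ x
        · rw [if_pos hj, if_neg (not_lt.mpr hj)]
          exact ih x _ (Or.inr ⟨_, rfl, hj⟩)
        · rw [if_neg hj, if_pos (not_le.mp hj)]
      · have e1 : visW h (j :: rest) (some y)
            = if y < h.getD j 0 then j :: visW h rest (some (h.getD j 0))
              else visW h rest (some y) := rfl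
        rw [e1, e2]
        by_cases hjy : y < h.getD j 0
        · rw [if_pos hjy, e3]
          by_cases hj : h.getD j 0 ≤ x
          · rw [if_pos hj, if_neg (not_lt.mpr hj)]
            exact ih x _ (Or.inr ⟨_, rfl, hj⟩)
          · rw [if_neg hj, if_pos (not_le.mp hj)]
        · rw [if_neg hjy, if_neg (fun hc : x < h.getD j 0 => hjy (lt_of_le_of_lt hyx hc))]
          exact ih x _ (Or.inr ⟨_, rfl, hyx⟩)

-- A's pass is specFold (and the stack after range n is visW over (range n).reverse)
theorem fold_A (h : List Int) :
    ∀ (n : Nat) (ans : List Int),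
      ((List.range n).foldl (fun st i =>
          (st.1.set i (st.1.getD i 0 + (st.2.length : Int)),
           i :: popW h (h.getD i 0) st.2))
        (ans, ([] : List Nat)))
      = (specFold h n ans, visW h (List.range n).reverse none) := by
  intro n
  induction n with
  | zero => intro ans; simp [visW, specFold]
  | succ m ih =>
      intro ans
      rw [List.range_succ, List.foldl_append, ih ans]
      unfold specFold
      rw [List.range_succ, List.foldl_append]
      simp only [List.foldl_cons, List.foldl_nil]
      refine Prod.ext rfl ?_
      show m :: popW h (h.getD m 0) (visW h (List.range m).reverse none)
          = visW h (List.range m ++ [m]).reverse none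
      rw [popW_visW h _ _ none (Or.inl rfl),
          show (List.range m ++ [m]).reverse = m :: (List.range m).reverse by simp]
      rfl

theorem pg_bounds (h : List Int) : ∀ (j : Nat) (x : Int), -1 ≤ pg h j x ∧ pg h j x < j := by
  intro j
  induction j with
  | zero => intro x; simp [pg]
  | succ m ih =>
      intro x
      unfold pg
      split_ifs
      · omega
      · have := ih x; omega

-- scanning below j with running max x = scanning the whole prefix ending at the previous-greater of x
theorem visW_some_pg (h : List Int) :
    ∀ (j : Nat) (x : Int),
      visW h (List.range j).reverse (some x)
      = (if pg h j x < 0 then []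
         else visW h (List.range ((pg h j x).toNat + 1)).reverse none) := by
  intro j
  induction j with
  | zero => simp [visW, pg]
  | succ m ih =>
      intro x
      have hrev : (List.range (m + 1)).reverse = m :: (List.range m).reverse := by
        simp [List.range_succ]
      rw [hrev]
      have e : visW h (m :: (List.range m).reverse) (some x)
          = if x < h.getD m 0 then m :: visW h (List.range m).reverse (some (h.getD m 0))
            else visW h (List.range m).reverse (some x) := rfl
      have epg : pg h (m + 1) x = if x < h.getD m 0 then ((m : Nat) : Int) else pg h m x := rfl
      rw [e, epg]
      by_cases hx : x < h.getD m 0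
      · rw [if_pos hx, if_pos hx, if_neg (by omega : ¬ ((m : Nat) : Int) < 0)]
        simp only [Int.toNat_natCast, hrev]
        rfl
      · rw [if_neg hx, if_neg hx, ih x]

-- skipping a chain of elements ≤ y ≤ x does not change the previous-greater of x
theorem pg_skip (h : List Int) :
    ∀ (j : Nat) (x y : Int), y ≤ x → pg h j x = pg h ((pg h j y + 1).toNat) x := by
  intro j
  induction j with
  | zero => intro x y _; simp [pg]
  | succ m ih =>
      intro x y hyx
      have epgy : pg h (m + 1) y = if y < h.getD m 0 then ((m : Nat) : Int) else pg h m y := rfl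
      have epgx : pg h (m + 1) x = if x < h.getD m 0 then ((m : Nat) : Int) else pg h m x := rfl
      by_cases hy : y < h.getD m 0
      · rw [epgy, if_pos hy, show (((m : Nat) : Int) + 1).toNat = m + 1 from by omega, epgx]
      · have hx : ¬ x < h.getD m 0 := fun hc => hy (lt_of_le_of_lt hyx hc)
        rw [epgy, if_neg hy, epgx, if_neg hx]
        exact ih x y hyx

theorem getD_map_range {f : Nat → Int} {m k : Nat} (hk : k < m) :
    ((List.range m).map f).getD k 0 = f k := by
  rw [List.getD_eq_getElem?_getD, List.getElem?_map, List.getElem?_range hk]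
  rfl

-- the jump loop with correct links computes the previous-greater index
theorem jumpB_eq (h : List Int) (m : Nat) (P : List Int)
    (hP : P = (List.range m).map (fun k => pg h k (h.getD k 0))) (x : Int) :
    ∀ (f : Nat) (j : Int), -1 ≤ j → j < (f : Int) → j < (m : Int) →
      jumpB h P x f j = pg h (j + 1).toNat x := by
  intro f
  induction f with
  | zero =>
      intro j h1 h2 _
      have hj : j = -1 := by omega
      subst hj
      simp [jumpB, pg]
  | succ g ih =>
      intro j h1 h2 h3
      unfold jumpB
      by_cases hc : 0 ≤ j ∧ h.getD j.toNat 0 ≤ x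
      · rw [if_pos hc]
        have hjm : j.toNat < m := by omega
        have hPj : P.getD j.toNat 0 = pg h j.toNat (h.getD j.toNat 0) := by
          rw [hP]; exact getD_map_range hjm
        have hb := pg_bounds h j.toNat (h.getD j.toNat 0)
        rw [hPj, ih _ (by omega) (by omega) (by omega)]
        have e1 : (j + 1).toNat = j.toNat + 1 := by omega
        have epg : pg h (j.toNat + 1) x
            = if x < h.getD j.toNat 0 then ((j.toNat : Nat) : Int) else pg h j.toNat x := rfl
        rw [e1, epg, if_neg (not_lt.mpr hc.2), pg_skip h j.toNat x (h.getD j.toNat 0) hc.2]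
      · rw [if_neg hc]
        rcases (by omega : j = -1 ∨ 0 ≤ j) with rfl | hj0
        · simp [pg]
        · have hx : x < h.getD j.toNat 0 := by
            by_contra hnx
            exact hc ⟨hj0, not_lt.mp hnx⟩
          have e1 : (j + 1).toNat = j.toNat + 1 := by omega
          have epg : pg h (j.toNat + 1) x
              = if x < h.getD j.toNat 0 then ((j.toNat : Nat) : Int) else pg h j.toNat x := rfl
          rw [e1, epg, if_pos hx]
          omega

-- the memoized count recursion agrees with the chain-length specification
theorem vC_rec (h : List Int) (m : Nat) :
    vC h m = (if pg h m (h.getD m 0) < 0 then (1 : Int)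
              else vC h (pg h m (h.getD m 0)).toNat + 1) := by
  unfold vC
  have hrev : (List.range (m + 1)).reverse = m :: (List.range m).reverse := by
    simp [List.range_succ]
  rw [hrev, show visW h (m :: (List.range m).reverse) none
        = m :: visW h (List.range m).reverse (some (h.getD m 0)) from rfl,
      visW_some_pg h m (h.getD m 0)]
  split_ifs <;> simp

-- B's pass is specFold, with P and cnt holding exactly the links and counts of every processed index
theorem fold_B (h : List Int) (n : Nat) :
    ∀ (m : Nat), m ≤ n → ∀ (ans : List Int),
      ((List.range m).foldl (fun st i =>
          let j := jumpB h st.2.1 (h.getD i 0) n ((i : Int) - 1)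
          (st.1.set i (st.1.getD i 0 + (if i == 0 then 0 else st.2.2.getD (i - 1) 0)),
           st.2.1 ++ [j],
           st.2.2 ++ [if j < 0 then (1 : Int) else st.2.2.getD j.toNat 0 + 1]))
        (ans, ([] : List Int), ([] : List Int)))
      = (specFold h m ans,
         (List.range m).map (fun k => pg h k (h.getD k 0)),
         (List.range m).map (fun k => vC h k)) := by
  intro m
  induction m with
  | zero => intro _ ans; simp [specFold]
  | succ m ih =>
      intro hmn ans
      rw [List.range_succ, List.foldl_append, ih (by omega) ans]
      simp only [List.foldl_cons, List.foldl_nil]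
      have hj : jumpB h ((List.range m).map (fun k => pg h k (h.getD k 0))) (h.getD m 0) n
            ((m : Int) - 1) = pg h m (h.getD m 0) := by
        rw [jumpB_eq h m _ rfl (h.getD m 0) n ((m : Int) - 1) (by omega) (by omega) (by omega)]
        congr 1
        omega
      simp only [hj]
      refine Prod.ext ?_ (Prod.ext ?_ ?_)
      · dsimp only
        unfold specFold
        rw [List.range_succ, List.foldl_append]
        simp only [List.foldl_cons, List.foldl_nil]
        congr 1
        rcases Nat.eq_zero_or_pos m with rfl | hm
        · simp [visW]
        · have e0 : ¬ ((m == 0) = true) := by simp; omega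
          rw [if_neg e0, getD_map_range (by omega : m - 1 < m)]
          unfold vC
          rw [show m - 1 + 1 = m from by omega]
      · dsimp only
        rw [List.map_append]
        simp only [List.map_cons, List.map_nil]
      · dsimp only
        rw [List.map_append]
        congr 1
        simp only [List.map_cons, List.map_nil]
        congr 1
        rw [vC_rec h m]
        have hb := pg_bounds h m (h.getD m 0)
        by_cases hneg : pg h m (h.getD m 0) < 0
        · rw [if_pos hneg, if_pos hneg]
        · rw [if_neg hneg, if_neg hneg,
              getD_map_range (by omega : (pg h m (h.getD m 0)).toNat < m)]

theorem calcA_eq_calcB (h : List Int) (n : Nat) (hn : n ≤ n) (ans : List Int) :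
    calcA h n ans = calcB h n ans := by
  unfold calcA calcB
  rw [fold_A, fold_B h n n hn ans]

-- ===== VERDICT (by name: the statement is the Claim_ definition above) =====
theorem seetowers_spec : Claim_equal_seetowers := by
  intro height _
  unfold Spec_seetowers seetowers seetowers_alt
  simp only [calcA_eq_calcB _ _ le_rfl]
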